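-- pv_equiv track=rewrite | github.com/daezy/surveypulse | backend/app/services/preprocessing.py | prepare_for_llm
-- ===== SOURCE A (Python) =====
-- from typing import List
--
-- def prepare_for_llm(responses: List[str], max_length: int = 4000) -> str:
--     """
--     Prepare responses for LLM input by concatenating with proper formatting
--     Ensures total length doesn't exceed max_length
--     """
--     formatted_responses = []
--     current_length = 0
--
--     for i, response in enumerate(responses, 1):
--         formatted = f"{i}. {response}\n"
--         response_length = len(formatted)
--
--         if current_length + response_length > max_length:
--             break
--
--         formatted_responses.append(formatted)
--         current_length += response_length
--
--     return "\n".join(formatted_responses)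
-- ===== SOURCE B (Python) =====
-- from typing import List
--
-- def prepare_for_llm(responses: List[str], max_length: int = 4000) -> str:
--     # Phase 1: format everything.
--     formatted = [f"{i}. {r}\n" for i, r in enumerate(responses, 1)]
--     # Phase 2: running totals of the per-item lengths.
--     totals = []
--     t = 0
--     for f in formatted:
--         t += len(f)
--         totals.append(t)
--     # Phase 3: totals are strictly increasing (each item is non-empty), so the
--     # number of totals within the budget is exactly the cutoff index.
--     k = sum(1 for t in totals if t <= max_length)
--     # Phase 4: join the kept prefix.
--     return "\n".join(formatted[:k])
-- ===== Notes on version B (the rewrite author's own statement) =====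
-- stated objective: alternative
-- what changed: Replaces the fused enumerate-loop with early break by a build-then-measure-then-slice pipeline: format all items, compute running length totals, count how many totals fit the budget (valid since totals strictly increase), and join that prefix.
import Mathlib
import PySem

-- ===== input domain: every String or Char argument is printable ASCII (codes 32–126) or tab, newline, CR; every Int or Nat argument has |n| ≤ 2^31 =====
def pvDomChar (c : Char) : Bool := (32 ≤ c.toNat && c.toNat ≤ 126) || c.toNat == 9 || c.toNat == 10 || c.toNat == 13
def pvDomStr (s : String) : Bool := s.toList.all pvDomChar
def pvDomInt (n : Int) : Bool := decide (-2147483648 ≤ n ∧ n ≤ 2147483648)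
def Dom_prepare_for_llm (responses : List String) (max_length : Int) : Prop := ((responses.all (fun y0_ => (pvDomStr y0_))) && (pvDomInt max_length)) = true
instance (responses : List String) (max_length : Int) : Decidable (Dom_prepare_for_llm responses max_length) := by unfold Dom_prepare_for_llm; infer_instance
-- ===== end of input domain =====

-- B restructures A's fused loop-with-break into a build / prefix-sum / count / slice pipeline; return values proved equal (objective: alternative).

-- shared f-string "i. response\n" (identical in both Pythons)
def pvFmt (p : Int × String) : String := PySem.Int.toStr p.1 ++ ". " ++ p.2 ++ "\n"

-- ===== PORT A =====
-- A's loop with break, appending formatted items while the budget allows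
def pvGoA (m : Int) : List String → Int → Int → List String
  | [], _, _ => []
  | r :: rest, i, cur =>
    let f := pvFmt (i, r)
    if cur + PySem.Str.len f > m then []
    else f :: pvGoA m rest (i + 1) (cur + PySem.Str.len f)

def prepare_for_llm (responses : List String) (max_length : Int) : String :=
  PySem.Str.join "\n" (pvGoA max_length responses 1 0)

-- ===== PORT B =====
-- running totals (the Phase-2 loop of Source B)
def pvCumsum : Int → List Int → List Int
  | _, [] => []
  | c, l :: ls => (c + l) :: pvCumsum (c + l) ls

def prepare_for_llm_alt (responses : List String) (max_length : Int) : String :=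
  let formatted := (PySem.List.enumerate responses 1).map pvFmt
  let totals := pvCumsum 0 (formatted.map PySem.Str.len)
  let k := totals.countP (fun t => decide (t ≤ max_length))
  PySem.Str.join "\n" (formatted.take k)

-- ===== PRECONDITION & SPEC =====
def Spec_prepare_for_llm (responses : List String) (max_length : Int) (out : String) : Prop := out = prepare_for_llm_alt responses max_length
instance (responses : List String) (max_length : Int) (out : String) : Decidable (Spec_prepare_for_llm responses max_length out) := by unfold Spec_prepare_for_llm; infer_instance

-- ===== CLAIM (what is proved, stated in full; the proofs are below) =====
def Claim_equal_prepare_for_llm : Prop := ∀ (responses : List String) (max_length : Int), Dom_prepare_for_llm responses max_length → Spec_prepare_for_llm responses max_length (prepare_for_llm responses max_length)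

-- ===== LEMMAS AND PROOFS =====

lemma pvFmt_len_pos (p : Int × String) : 1 ≤ PySem.Str.len (pvFmt p) := by
  unfold pvFmt
  rw [PySem.Str.len_append, PySem.Str.len_append, PySem.Str.len_append]
  have h1 : (0:Int) ≤ PySem.Str.len (PySem.Int.toStr p.1) := by rw [PySem.Str.len_eq]; positivity
  have h2 : (0:Int) ≤ PySem.Str.len p.2 := by rw [PySem.Str.len_eq]; positivity
  have h3 : PySem.Str.len ". " = 2 := by decide
  have h4 : PySem.Str.len "\n" = 1 := by decide
  omega

lemma pvCumsum_gt (ls : List Int) (hls : ∀ l ∈ ls, 1 ≤ l) :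
    ∀ c, ∀ t ∈ pvCumsum c ls, c < t := by
  induction ls with
  | nil => intro c t ht; simp [pvCumsum] at ht
  | cons l ls ih =>
    intro c t ht
    simp only [pvCumsum, List.mem_cons] at ht
    have hl : 1 ≤ l := hls l (by simp)
    rcases ht with h | h
    · omega
    · have := ih (fun x hx => hls x (by simp [hx])) (c + l) t h
      omega

lemma pvGo_eq (m : Int) (rs : List String) : ∀ (i cur : Int),
    pvGoA m rs i cur =
      ((PySem.List.enumerate rs i).map pvFmt).take
        ((pvCumsum cur ((((PySem.List.enumerate rs i).map pvFmt)).map PySem.Str.len)).countP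
          (fun t => decide (t ≤ m))) := by
  induction rs with
  | nil => intro i cur; simp [pvGoA, PySem.List.enumerate_nil, pvCumsum]
  | cons r rest ih =>
    intro i cur
    rw [PySem.List.enumerate_cons]
    simp only [List.map_cons, pvCumsum, pvGoA]
    by_cases h : cur + PySem.Str.len (pvFmt (i, r)) > m
    · rw [if_pos h]
      have hall : ∀ t ∈ pvCumsum (cur + PySem.Str.len (pvFmt (i, r)))
          (((PySem.List.enumerate rest (i+1)).map pvFmt).map PySem.Str.len), m < t := by
        intro t ht
        have := pvCumsum_gt _ (by
          intro l hl
          simp only [List.mem_map] at hl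
          obtain ⟨f, hf, rfl⟩ := hl
          obtain ⟨p, hp, rfl⟩ := hf
          exact pvFmt_len_pos p) _ t ht
        omega
      have hc0 : (pvCumsum (cur + PySem.Str.len (pvFmt (i, r)))
          (((PySem.List.enumerate rest (i+1)).map pvFmt).map PySem.Str.len)).countP
            (fun t => decide (t ≤ m)) = 0 := by
        rw [List.countP_eq_zero]
        intro t ht
        simp only [decide_eq_true_eq]
        exact not_le.mpr (hall t ht)
      have hd : decide (cur + PySem.Str.len (pvFmt (i, r)) ≤ m) = false := by
        simp only [decide_eq_false_iff_not]; omega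
      rw [List.countP_cons, hd, hc0]
      simp
    · rw [if_neg h]
      have hd : decide (cur + PySem.Str.len (pvFmt (i, r)) ≤ m) = true := by
        simp only [decide_eq_true_eq]; omega
      rw [List.countP_cons, hd, ih (i + 1) (cur + PySem.Str.len (pvFmt (i, r)))]
      simp

-- ===== VERDICT (by name: the statement is the Claim_ definition above) =====
theorem prepare_for_llm_spec : Claim_equal_prepare_for_llm := by
  intro responses max_length _
  unfold Spec_prepare_for_llm prepare_for_llm prepare_for_llm_alt
  rw [pvGo_eq]
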